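-- pv_equiv track=rewrite | github.com/beurmuz/algorithm-zip | src/programmers/Lv_0/231001.py | solution
-- ===== SOURCE A (Python) =====
-- def solution(n, control):
--     for string in control:
--         if string == "w":
--             n += 1
--         elif string == "s":
--             n -= 1
--         elif string == "d":
--             n += 10
--         elif string == "a":
--             n -= 10
--     return n
-- ===== SOURCE B (Python) =====
-- def solution(n, control):
--     return (n + control.count("w") - control.count("s")
--               + 10 * control.count("d") - 10 * control.count("a"))
-- ===== Notes on version B (the rewrite author's own statement) =====
-- stated objective: simpler
-- what changed: Replaces the per-element branch-and-accumulate loop by four list.count tallies combined in one closed-form arithmetic expression.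
import Mathlib
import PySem

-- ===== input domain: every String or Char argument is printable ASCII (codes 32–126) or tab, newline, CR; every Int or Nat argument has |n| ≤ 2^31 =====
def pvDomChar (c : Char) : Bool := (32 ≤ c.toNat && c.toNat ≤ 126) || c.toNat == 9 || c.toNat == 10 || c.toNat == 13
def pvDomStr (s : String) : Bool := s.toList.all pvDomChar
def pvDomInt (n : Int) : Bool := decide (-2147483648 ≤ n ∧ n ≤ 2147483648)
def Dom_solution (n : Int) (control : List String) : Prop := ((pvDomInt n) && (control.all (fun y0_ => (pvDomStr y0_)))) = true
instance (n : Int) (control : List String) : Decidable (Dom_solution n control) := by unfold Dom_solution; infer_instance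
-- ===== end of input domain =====

-- B replaces A's per-element branch-and-accumulate loop by four count tallies combined in one closed-form expression (objective: simpler).

-- ===== PORT A =====
def solution (n : Int) (control : List String) : Int :=
  control.foldl (fun n string =>
    if string == "w" then n + 1
    else if string == "s" then n - 1
    else if string == "d" then n + 10
    else if string == "a" then n - 10
    else n) n

-- ===== PORT B =====
def solution_alt (n : Int) (control : List String) : Int :=
  n + (PySem.List.count control "w" : Int) - (PySem.List.count control "s" : Int)
    + 10 * (PySem.List.count control "d" : Int) - 10 * (PySem.List.count control "a" : Int)

-- ===== PRECONDITION & SPEC =====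
def Spec_solution (n : Int) (control : List String) (out : Int) : Prop := out = solution_alt n control
instance (n : Int) (control : List String) (out : Int) : Decidable (Spec_solution n control out) := by unfold Spec_solution; infer_instance

-- ===== CLAIM (what is proved, stated in full; the proofs are below) =====
def Claim_equal_solution : Prop := ∀ (n : Int) (control : List String), Dom_solution n control → Spec_solution n control (solution n control)

-- ===== LEMMAS AND PROOFS =====
theorem solution_eq_alt (n : Int) (control : List String) :
    solution n control = solution_alt n control := by
  induction control generalizing n with
  | nil => simp [solution, solution_alt, PySem.List.count]
  | cons s t ih =>
    simp only [solution, List.foldl_cons] at *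
    rw [ih]
    simp only [solution_alt, PySem.List.count, List.count_cons]
    by_cases hw : s = "w" <;> by_cases hs : s = "s" <;> by_cases hd : s = "d" <;> by_cases ha : s = "a" <;>
      simp_all <;> ring

-- ===== VERDICT (by name: the statement is the Claim_ definition above) =====
theorem solution_spec : Claim_equal_solution := by
  intro n control _
  exact solution_eq_alt n control
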